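-- pv_equiv track=rewrite | github.com/UlisesMiranda/TeoriaComputacional | Practica4.py | recorridoRutasGanadoras
-- ===== SOURCE A (Python) =====
-- from itertools import zip_longest
--
-- def recorridoRutasGanadoras(rutaJugadorInicial: list, rutaJugadorSecundario: list):
--     i = 0
--     for l1, l2 in zip_longest(rutaJugadorInicial, rutaJugadorSecundario):
--
--         if not l1:
--             return "principal"
--         if not l2:
--             return "secundario"
--     return "principal"
-- ===== SOURCE B (Python) =====
-- def recorridoRutasGanadoras(rutaJugadorInicial: list, rutaJugadorSecundario: list):
--     p1 = next((i for i, x in enumerate(rutaJugadorInicial) if not x), len(rutaJugadorInicial))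
--     p2 = next((i for i, x in enumerate(rutaJugadorSecundario) if not x), len(rutaJugadorSecundario))
--     return "principal" if p1 <= p2 else "secundario"
-- ===== Notes on version B (the rewrite author's own statement) =====
-- stated objective: simpler
-- what changed: Replaces the parallel zip_longest scan with two independent first-falsy-index computations compared once (ties favour 'principal').
import Mathlib
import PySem

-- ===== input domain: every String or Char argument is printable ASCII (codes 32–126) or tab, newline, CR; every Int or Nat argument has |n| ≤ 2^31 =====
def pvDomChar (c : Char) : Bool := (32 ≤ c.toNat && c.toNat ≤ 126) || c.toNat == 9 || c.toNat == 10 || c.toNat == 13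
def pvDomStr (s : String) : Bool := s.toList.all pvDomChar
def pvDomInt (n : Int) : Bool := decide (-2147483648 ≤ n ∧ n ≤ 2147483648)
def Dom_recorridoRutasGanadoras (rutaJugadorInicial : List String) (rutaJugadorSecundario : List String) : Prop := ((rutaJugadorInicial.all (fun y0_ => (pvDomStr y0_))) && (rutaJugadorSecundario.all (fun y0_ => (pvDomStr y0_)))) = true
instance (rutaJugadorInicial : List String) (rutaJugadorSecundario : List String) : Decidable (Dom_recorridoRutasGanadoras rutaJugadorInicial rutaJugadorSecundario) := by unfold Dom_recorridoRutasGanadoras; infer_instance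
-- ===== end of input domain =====

-- B replaces A's parallel zip_longest scan by two independent first-falsy indices compared once (simpler decomposition).

-- ===== PORT A =====
-- parallel scan mirroring `for l1, l2 in zip_longest(l1s, l2s)`: an exhausted side yields None (falsy)
def recorridoRutasGanadorasAux : List String → List String → String
  | [], _ => "principal"          -- l1 is None (or loop empty): "not l1" fires / loop ends → "principal"
  | a :: _, [] => if a = "" then "principal" else "secundario"   -- l2 is None: falsy
  | a :: as, b :: bs =>
      if a = "" then "principal"
      else if b = "" then "secundario"
      else recorridoRutasGanadorasAux as bs

def recorridoRutasGanadoras (rutaJugadorInicial : List String) (rutaJugadorSecundario : List String) : String :=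
  recorridoRutasGanadorasAux rutaJugadorInicial rutaJugadorSecundario

-- ===== PORT B =====
-- index of the first falsy ("") element, or the length if none — B's `next(..., len(xs))`
def firstFalsyIdx : List String → Nat
  | [] => 0
  | a :: as => if a = "" then 0 else firstFalsyIdx as + 1

def recorridoRutasGanadoras_alt (rutaJugadorInicial : List String) (rutaJugadorSecundario : List String) : String :=
  let p1 := firstFalsyIdx rutaJugadorInicial
  let p2 := firstFalsyIdx rutaJugadorSecundario
  if p1 ≤ p2 then "principal" else "secundario"

-- ===== PRECONDITION & SPEC =====
def Spec_recorridoRutasGanadoras (rutaJugadorInicial : List String) (rutaJugadorSecundario : List String) (out : String) : Prop := out = recorridoRutasGanadoras_alt rutaJugadorInicial rutaJugadorSecundario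
instance (rutaJugadorInicial : List String) (rutaJugadorSecundario : List String) (out : String) : Decidable (Spec_recorridoRutasGanadoras rutaJugadorInicial rutaJugadorSecundario out) := by unfold Spec_recorridoRutasGanadoras; infer_instance

-- ===== CLAIM (what is proved, stated in full; the proofs are below) =====
def Claim_equal_recorridoRutasGanadoras : Prop := ∀ (rutaJugadorInicial : List String) (rutaJugadorSecundario : List String), Dom_recorridoRutasGanadoras rutaJugadorInicial rutaJugadorSecundario → Spec_recorridoRutasGanadoras rutaJugadorInicial rutaJugadorSecundario (recorridoRutasGanadoras rutaJugadorInicial rutaJugadorSecundario)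

-- ===== LEMMAS AND PROOFS =====
theorem aux_eq_alt : ∀ (xs ys : List String),
    recorridoRutasGanadorasAux xs ys =
      (if firstFalsyIdx xs ≤ firstFalsyIdx ys then "principal" else "secundario")
  | [], ys => by simp [recorridoRutasGanadorasAux, firstFalsyIdx]
  | a :: as, [] => by
      by_cases h : a = "" <;>
        simp [recorridoRutasGanadorasAux, firstFalsyIdx, h]
  | a :: as, b :: bs => by
      by_cases h1 : a = ""
      · simp [recorridoRutasGanadorasAux, firstFalsyIdx, h1]
      · by_cases h2 : b = ""
        · simp [recorridoRutasGanadorasAux, firstFalsyIdx, h1, h2]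
        · have ih := aux_eq_alt as bs
          by_cases hle : firstFalsyIdx as ≤ firstFalsyIdx bs <;>
            simp [recorridoRutasGanadorasAux, firstFalsyIdx, h1, h2, ih, hle]

-- ===== VERDICT (by name: the statement is the Claim_ definition above) =====
theorem recorridoRutasGanadoras_spec : Claim_equal_recorridoRutasGanadoras := by
  intro xs ys _
  unfold Spec_recorridoRutasGanadoras recorridoRutasGanadoras recorridoRutasGanadoras_alt
  simp only []
  exact aux_eq_alt xs ys
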